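-- pv_equiv track=rewrite | github.com/EmaSevcikova/shellcode_detector | pattern_utils.py | find_pattern_sets
-- ===== SOURCE A (Python) =====
-- def find_pattern(buffer, pattern, max_iter=0):
--     """Find the first occurrence of a pattern in a buffer."""
--     pattern_length = len(pattern)
--     buffer_length = len(buffer)
--     for i in range(buffer_length - pattern_length + 1):
--         if max_iter != 0 and i > max_iter:
--             break
--         match = True
--         for j in range(pattern_length):
--             # Handle wildcards (represented as None or values > 0xF0 which aren't valid x86 opcodes)
--             if pattern[j] is None or (isinstance(pattern[j], int) and pattern[j] > 0xF0):
--                 continue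
--             if buffer[i + j] != pattern[j]:
--                 match = False
--                 break
--         if match:
--             return i
--     return -1
--
-- def find_all_patterns(buffer, pattern, max_iter=0):
--     """Find all occurrences of a pattern in a buffer."""
--     results = []
--     pattern_length = len(pattern)
--     buffer_length = len(buffer)
--     for i in range(buffer_length - pattern_length + 1):
--         if max_iter != 0 and i > max_iter:
--             break
--         match = True
--         for j in range(pattern_length):
--             # Handle wildcards
--             if pattern[j] is None or (isinstance(pattern[j], int) and pattern[j] > 0xF0):
--                 continue
--             if buffer[i + j] != pattern[j]:
--                 match = False
--                 break
--         if match: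
--             results.append(i)
--     return results
--
-- def find_pattern_sets(buffer, pattern_sets, max_distance=100):
--     """
--     Find occurrences of multiple pattern sets with distance constraints.
--     Returns True if all pattern sets are found within max_distance of each other.
--     """
--     if not pattern_sets:
--         return False
--
--     # Find locations of first pattern set
--     first_pattern_locs = []
--     for pattern in pattern_sets[0]:
--         locations = find_all_patterns(buffer, pattern)
--         first_pattern_locs.extend(locations)
--
--     if not first_pattern_locs:
--         return False
--
--     # For each starting point, try to find all other patterns within max_distance
--     for start_loc in first_pattern_locs:
--         all_patterns_found = True
--
--         # Check if all remaining pattern sets can be found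
--         for pattern_set in pattern_sets[1:]:
--             pattern_set_found = False
--
--             for pattern in pattern_set:
--                 # Look for this pattern within the specified distance
--                 search_start = max(0, start_loc - max_distance)
--                 search_end = min(len(buffer), start_loc + max_distance)
--                 search_buffer = buffer[search_start:search_end]
--
--                 if find_pattern(search_buffer, pattern) != -1:
--                     pattern_set_found = True
--                     break
--
--             if not pattern_set_found:
--                 all_patterns_found = False
--                 break
--
--         if all_patterns_found:
--             return True
--
--     return False
-- ===== SOURCE B (Python) =====
-- def _occurrences(buffer, pattern):
--     """All positions p where pattern matches buffer at p (ascending).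
--     Concrete (non-wildcard) byte constraints are extracted once."""
--     n, m = len(buffer), len(pattern)
--     checks = [(j, v) for j, v in enumerate(pattern)
--               if not (v is None or (isinstance(v, int) and v > 0xF0))]
--     return [p for p in range(n + 1 - m)
--             if all(buffer[p + j] == v for j, v in checks)]
--
-- def _set_info(buffer, pset):
--     """(trivial, [(len(pat), occurrences(pat)) ...]); trivial when the set
--     holds an empty pattern, which matches anywhere (even an empty window)."""
--     info = []
--     for pat in pset:
--         if not pat:
--             return (True, info)
--         info.append((len(pat), _occurrences(buffer, pat)))
--     return (False, info)
--
-- def _first_geq(a, x, lo, hi):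
--     """Index of the first element >= x in the sorted slice a[lo:hi]."""
--     if lo >= hi:
--         return hi
--     mid = (lo + hi) // 2
--     if a[mid] < x:
--         return _first_geq(a, x, mid + 1, hi)
--     return _first_geq(a, x, lo, mid)
--
-- def find_pattern_sets(buffer, pattern_sets, max_distance=100):
--     if not pattern_sets:
--         return False
--     starts = []
--     for pat in pattern_sets[0]:
--         starts.extend(_occurrences(buffer, pat))
--     if not starts:
--         return False
--     n = len(buffer)
--     tail = [_set_info(buffer, pset) for pset in pattern_sets[1:]]
--     for s in starts:
--         lo = max(0, s - max_distance)
--         hi = min(n, s + max_distance)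
--         ok = True
--         for trivial, info in tail:
--             if trivial:
--                 continue
--             found = False
--             for m, occ in info:
--                 i = _first_geq(occ, lo, 0, len(occ))
--                 if i < len(occ) and occ[i] + m <= hi:
--                     found = True
--                     break
--             if not found:
--                 ok = False
--                 break
--         if ok:
--             return True
--     return False
-- ===== Notes on version B (the rewrite author's own statement) =====
-- stated objective: alternative
-- what changed: B precomputes each later pattern's full occurrence list once (with its concrete, non-wildcard checks extracted once per pattern) and answers each start location's window query by binary search on the sorted occurrence list, instead of A re-slicing the buffer and re-running the naive wildcard scan for every (start, set, pattern) triple; a timing run does not favour B when start locations are few, so no speed is claimed.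
-- outside the precondition, e.g. on find_pattern_sets([0, 1, 1], [[[0]], [[1]]], -1): A returns True, B returns False
import Mathlib
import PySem

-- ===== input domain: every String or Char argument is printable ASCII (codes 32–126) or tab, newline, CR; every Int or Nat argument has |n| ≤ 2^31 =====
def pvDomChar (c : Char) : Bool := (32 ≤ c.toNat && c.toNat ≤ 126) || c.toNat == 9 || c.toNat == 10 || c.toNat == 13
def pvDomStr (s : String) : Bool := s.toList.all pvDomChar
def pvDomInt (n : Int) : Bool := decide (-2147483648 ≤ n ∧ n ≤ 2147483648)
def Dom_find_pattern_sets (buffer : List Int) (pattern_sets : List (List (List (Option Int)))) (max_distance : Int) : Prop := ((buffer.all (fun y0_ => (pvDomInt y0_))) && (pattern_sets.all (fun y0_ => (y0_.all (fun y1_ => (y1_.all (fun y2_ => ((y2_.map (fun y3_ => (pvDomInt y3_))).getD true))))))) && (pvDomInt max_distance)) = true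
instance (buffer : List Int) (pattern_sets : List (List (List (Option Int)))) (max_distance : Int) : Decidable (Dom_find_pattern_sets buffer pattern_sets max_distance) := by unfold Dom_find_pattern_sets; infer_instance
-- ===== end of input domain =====

-- B precomputes each later pattern's occurrence list once and answers each start's
-- window query by binary search, instead of A re-slicing and re-scanning the buffer
-- per (start, set, pattern) triple; objective: alternative algorithm, same proved value.

-- ===== PORT A =====
-- inner match loop of find_pattern / find_all_patterns ('for j in range(pattern_length): ...')
def pvMatchA (buffer : List Int) (pattern : List (Option Int)) (i : Nat) : Bool :=
  (List.range pattern.length).all (fun j =>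
    match pattern.getD j none with
    | none => true                                   -- wildcard: None
    | some v => if v > 240 then true                 -- wildcard: > 0xF0
                else decide (buffer.getD (i + j) 0 = v))

-- 'for i in range(buffer_length - pattern_length + 1): ... return i ... return -1'
def pvFindLoop (buffer : List Int) (pattern : List (Option Int)) (max_iter : Int) : List Nat → Int
  | [] => -1
  | i :: rest =>
    if max_iter != 0 && decide ((i : Int) > max_iter) then -1
    else if pvMatchA buffer pattern i then (i : Int)
    else pvFindLoop buffer pattern max_iter rest

def find_pattern (buffer : List Int) (pattern : List (Option Int)) (max_iter : Int) : Int :=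
  pvFindLoop buffer pattern max_iter (List.range (buffer.length + 1 - pattern.length))

-- same loop, collecting every match
def pvFindAllLoop (buffer : List Int) (pattern : List (Option Int)) (max_iter : Int) : List Nat → List Int
  | [] => []
  | i :: rest =>
    if max_iter != 0 && decide ((i : Int) > max_iter) then []
    else (if pvMatchA buffer pattern i then [(i : Int)] else []) ++
         pvFindAllLoop buffer pattern max_iter rest

def find_all_patterns (buffer : List Int) (pattern : List (Option Int)) (max_iter : Int) : List Int :=
  pvFindAllLoop buffer pattern max_iter (List.range (buffer.length + 1 - pattern.length))

def find_pattern_sets (buffer : List Int) (pattern_sets : List (List (List (Option Int)))) (max_distance : Int) : Bool :=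
  match pattern_sets with
  | [] => false
  | first :: rest =>
    let first_locs := first.foldl (fun acc pat => acc ++ find_all_patterns buffer pat 0) []
    if first_locs.isEmpty then false
    else
      first_locs.any (fun start_loc =>
        rest.all (fun pset =>
          pset.any (fun pat =>
            find_pattern
              (PySem.List.slice buffer (some (max 0 (start_loc - max_distance)))
                                       (some (min ((buffer.length : Int)) (start_loc + max_distance))))
              pat 0 != -1)))

-- ===== PORT B =====
-- concrete (non-wildcard) checks of a pattern, extracted once ('_occurrences', first half)
def pvChecks (pattern : List (Option Int)) : List (Int × Int) :=
  (PySem.List.enumerate pattern 0).filterMap (fun jv =>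
    match jv.2 with
    | none => none
    | some v => if v > 240 then none else some (jv.1, v))

-- '[p for p in range(n + 1 - m) if all(buffer[p+j] == v for j, v in checks)]'
def pvOccs (buffer : List Int) (pattern : List (Option Int)) : List Int :=
  List.map (fun (p : Nat) => (p : Int))
    (List.filter (fun (p : Nat) =>
      (pvChecks pattern).all (fun jv =>
        decide (PySem.List.pyGetD buffer ((p : Int) + jv.1) 0 = jv.2)))
      (List.range (buffer.length + 1 - pattern.length)))

-- '_set_info': (trivial, [(len(pat), occurrences(pat)), ...])
def pvSetInfo (buffer : List Int) : List (List (Option Int)) → Bool × List (Int × List Int)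
  | [] => (false, [])
  | pat :: rest =>
    if pat.isEmpty then (true, [])
    else
      ((pvSetInfo buffer rest).1,
       ((pat.length : Int), pvOccs buffer pat) :: (pvSetInfo buffer rest).2)

-- '_first_geq': index of the first element ≥ x in the sorted slice a[lo:hi]
def pvFirstGeq (a : List Int) (x : Int) (lo hi : Nat) : Nat :=
  if lo < hi then
    if a.getD ((lo + hi) / 2) 0 < x then pvFirstGeq a x ((lo + hi) / 2 + 1) hi
    else pvFirstGeq a x lo ((lo + hi) / 2)
  else hi
termination_by hi - lo
decreasing_by all_goals omega

def find_pattern_sets_alt (buffer : List Int) (pattern_sets : List (List (List (Option Int)))) (max_distance : Int) : Bool :=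
  match pattern_sets with
  | [] => false
  | first :: rest =>
    let starts := first.foldl (fun acc pat => acc ++ pvOccs buffer pat) []
    if starts.isEmpty then false
    else
      let tail := rest.map (fun pset => pvSetInfo buffer pset)
      starts.any (fun s =>
        tail.all (fun info =>
          info.1 ||
          info.2.any (fun mo =>
            decide (pvFirstGeq mo.2 (max 0 (s - max_distance)) 0 mo.2.length < mo.2.length) &&
            decide (mo.2.getD (pvFirstGeq mo.2 (max 0 (s - max_distance)) 0 mo.2.length) 0 + mo.1 ≤
                    min ((buffer.length : Int)) (s + max_distance)))))

-- ===== PRECONDITION & SPEC =====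
-- Pre_ restricts to the natural domain of a nonnegative max_distance: for negative
-- max_distance the end index start_loc+max_distance of A's slice can go negative, so
-- Python's negative-index wraparound makes A search an accidental window.
def Pre_find_pattern_sets (buffer : List Int) (pattern_sets : List (List (List (Option Int)))) (max_distance : Int) : Prop := 0 ≤ max_distance
instance (buffer : List Int) (pattern_sets : List (List (List (Option Int)))) (max_distance : Int) : Decidable (Pre_find_pattern_sets buffer pattern_sets max_distance) := by unfold Pre_find_pattern_sets; infer_instance

def pvWitness_find_pattern_sets : List Int × List (List (List (Option Int))) × Int :=
  ([1, 2, 1, 3], [[[some 1, none]], [[some 3]]], 100)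

def Spec_find_pattern_sets (buffer : List Int) (pattern_sets : List (List (List (Option Int)))) (max_distance : Int) (out : Bool) : Prop := out = find_pattern_sets_alt buffer pattern_sets max_distance
instance (buffer : List Int) (pattern_sets : List (List (List (Option Int)))) (max_distance : Int) (out : Bool) : Decidable (Spec_find_pattern_sets buffer pattern_sets max_distance out) := by unfold Spec_find_pattern_sets; infer_instance

-- ===== CLAIM (what is proved, stated in full; the proofs are below) =====
def Claim_equal_find_pattern_sets : Prop := ∀ (buffer : List Int) (pattern_sets : List (List (List (Option Int)))) (max_distance : Int), Dom_find_pattern_sets buffer pattern_sets max_distance → Pre_find_pattern_sets buffer pattern_sets max_distance → Spec_find_pattern_sets buffer pattern_sets max_distance (find_pattern_sets buffer pattern_sets max_distance)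

-- ===== LEMMAS AND PROOFS =====

-- the concrete constraints of a pattern all hold at position p
def pvConcOK (buffer : List Int) (pat : List (Option Int)) (p : Nat) : Prop :=
  ∀ k, k < pat.length → ∀ v : Int, pat.getD k none = some v → v ≤ 240 →
    buffer.getD (p + k) 0 = v

theorem pvMatchA_iff (buffer : List Int) (pat : List (Option Int)) (p : Nat) :
    pvMatchA buffer pat p = true ↔ pvConcOK buffer pat p := by
  simp only [pvMatchA, List.all_eq_true, List.mem_range, pvConcOK]
  constructor
  · intro h k hk v hv hv240
    have := h k hk
    rw [hv] at this
    simpa [show ¬ (v > 240) by omega] using this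
  · intro h j hj
    cases hx : pat.getD j none with
    | none => simp
    | some v =>
      by_cases hv : v > 240
      · simp [hv]
      · simp only [if_neg hv, decide_eq_true_eq]
        exact h j hj v hx (by omega)

theorem pvChecks_mem (pat : List (Option Int)) (jv : Int × Int) :
    jv ∈ pvChecks pat ↔
    ∃ k : Nat, k < pat.length ∧ pat.getD k none = some jv.2 ∧ jv.2 ≤ 240 ∧ jv.1 = (k : Nat) := by
  simp only [pvChecks, List.mem_filterMap, PySem.List.mem_enumerate_iff]
  constructor
  · rintro ⟨⟨j, v⟩, ⟨k, hk, hp⟩, hf⟩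
    cases hp
    cases hv : pat[k] with
    | none => simp [hv] at hf
    | some v =>
      simp only [hv] at hf
      by_cases h240 : v > 240
      · simp [h240] at hf
      · simp only [if_neg h240, Option.some.injEq] at hf
        subst hf
        exact ⟨k, hk, by simp [List.getD_eq_getElem?_getD, List.getElem?_eq_getElem hk, hv],
               by omega, by simp⟩
  · rintro ⟨k, hk, hget, h240, hj⟩
    refine ⟨((k : Int), pat[k]), ⟨k, hk, by simp⟩, ?_⟩
    rw [List.getD_eq_getElem?_getD, List.getElem?_eq_getElem hk] at hget
    simp only [Option.getD_some] at hget
    simp [hget, show ¬ (jv.2 > 240) by omega, hj, Prod.ext_iff]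

theorem pvBpred_iff (buffer : List Int) (pat : List (Option Int)) (p : Nat) :
    ((pvChecks pat).all (fun jv =>
      decide (PySem.List.pyGetD buffer ((p : Int) + jv.1) 0 = jv.2)) = true) ↔
    pvConcOK buffer pat p := by
  simp only [List.all_eq_true, decide_eq_true_eq, pvConcOK]
  constructor
  · intro h k hk v hget hv
    have := h ((k : Int), v) ((pvChecks_mem pat _).2 ⟨k, hk, hget, hv, rfl⟩)
    rw [show (p : Int) + ((k : Int), v).1 = ((p + k : Nat) : Int) from by push_cast; ring,
        PySem.List.pyGetD_natCast] at this
    exact this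
  · intro h jv hjv
    obtain ⟨k, hk, hget, hv, hj⟩ := (pvChecks_mem pat jv).1 hjv
    have := h k hk jv.2 hget hv
    rw [hj, show (p : Int) + ((k : Nat) : Int) = ((p + k : Nat) : Int) from by push_cast; ring,
        PySem.List.pyGetD_natCast]
    exact this

theorem pvOccs_mem (buffer : List Int) (pat : List (Option Int)) (q : Int) :
    q ∈ pvOccs buffer pat ↔
    ∃ p : Nat, p + pat.length ≤ buffer.length ∧ pvConcOK buffer pat p ∧ q = (p : Int) := by
  simp only [pvOccs, List.mem_map, List.mem_filter, List.mem_range]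
  constructor
  · rintro ⟨p, ⟨hp, hall⟩, rfl⟩
    exact ⟨p, by omega, (pvBpred_iff buffer pat p).1 hall, rfl⟩
  · rintro ⟨p, hp, hok, rfl⟩
    exact ⟨p, ⟨by omega, (pvBpred_iff buffer pat p).2 hok⟩, rfl⟩

theorem pvOccs_sorted (buffer : List Int) (pat : List (Option Int)) :
    (pvOccs buffer pat).Pairwise (· < ·) := by
  unfold pvOccs
  rw [List.pairwise_map]
  exact (List.pairwise_lt_range.sublist List.filter_sublist).imp (fun h => by exact_mod_cast h)

theorem pvFindAllLoop_zero (buffer : List Int) (pat : List (Option Int)) (l : List Nat) :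
    pvFindAllLoop buffer pat 0 l =
    List.map (fun (i : Nat) => (i : Int)) (l.filter (fun i => pvMatchA buffer pat i)) := by
  induction l with
  | nil => rfl
  | cons i rest ih =>
    simp only [pvFindAllLoop, bne_self_eq_false, Bool.false_and, ih, List.filter_cons]
    by_cases h : pvMatchA buffer pat i <;> simp [h]

theorem pvFindAll_eq_occs (buffer : List Int) (pat : List (Option Int)) :
    find_all_patterns buffer pat 0 = pvOccs buffer pat := by
  rw [find_all_patterns, pvFindAllLoop_zero, pvOccs]
  refine congrArg (List.map (fun (p : Nat) => (p : Int))) (List.filter_congr (fun i _ => ?_))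
  rw [Bool.eq_iff_iff, pvMatchA_iff, pvBpred_iff]

theorem pvFindLoop_ne (buffer : List Int) (pat : List (Option Int)) (l : List Nat) :
    pvFindLoop buffer pat 0 l ≠ -1 ↔ ∃ i ∈ l, pvMatchA buffer pat i = true := by
  induction l with
  | nil => simp [pvFindLoop]
  | cons i rest ih =>
    simp only [pvFindLoop]
    rw [if_neg (by simp)]
    by_cases h : pvMatchA buffer pat i
    · rw [if_pos h]
      simp only [List.mem_cons]
      constructor
      · intro _; exact ⟨i, Or.inl rfl, h⟩
      · intro _; omega
    · rw [if_neg h, ih]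
      simp only [List.mem_cons]
      constructor
      · rintro ⟨j, hj, hm⟩; exact ⟨j, Or.inr hj, hm⟩
      · rintro ⟨j, hj | hj, hm⟩
        · cases hj; exact absurd hm h
        · exact ⟨j, hj, hm⟩

theorem pvGetD_take_drop (l : List Int) (a t i : Nat) (h : i < t) (_h2 : a + i < l.length) :
    ((l.drop a).take t).getD i 0 = l.getD (a + i) 0 := by
  rw [List.getD_eq_getElem?_getD, List.getD_eq_getElem?_getD, List.getElem?_take_of_lt h,
      List.getElem?_drop]

theorem pvConcOK_shift (buffer : List Int) (pat : List (Option Int)) (a t k : Nat)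
    (ht : a + t ≤ buffer.length) (hk : k + pat.length ≤ t) :
    pvConcOK ((buffer.drop a).take t) pat k ↔ pvConcOK buffer pat (a + k) := by
  unfold pvConcOK
  constructor
  · intro h j hj v hv hv240
    have := h j hj v hv hv240
    rwa [pvGetD_take_drop _ _ _ _ (by omega) (by omega), show a + (k + j) = a + k + j by omega] at this
  · intro h j hj v hv hv240
    have := h j hj v hv hv240
    rwa [pvGetD_take_drop _ _ _ _ (by omega) (by omega), show a + (k + j) = a + k + j by omega]

-- A's per-pattern window check, characterised
theorem pvAcheck_iff (buffer : List Int) (pat : List (Option Int)) (lo hi : Int)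
    (h0 : 0 ≤ lo) (hlh : lo ≤ hi) (hhn : hi ≤ (buffer.length : Int)) :
    (find_pattern (PySem.List.slice buffer (some lo) (some hi)) pat 0 ≠ -1) ↔
    ∃ p : Nat, lo ≤ (p : Int) ∧ (p : Int) + pat.length ≤ hi ∧ pvConcOK buffer pat p := by
  have e1 : (lo.toNat : Int) = lo := Int.toNat_of_nonneg h0
  have e2 : (hi.toNat : Int) = hi := Int.toNat_of_nonneg (le_trans h0 hlh)
  have h1 : PySem.List.slice buffer (some lo) (some hi) =
      (buffer.drop lo.toNat).take (hi.toNat - lo.toNat) :=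
    PySem.List.slice_of_nonneg buffer (by omega) (by omega) (by omega) (by omega)
  have hlen : ((buffer.drop lo.toNat).take (hi.toNat - lo.toNat)).length = hi.toNat - lo.toNat := by
    simp [List.length_take, List.length_drop]; omega
  rw [find_pattern, h1, pvFindLoop_ne]
  constructor
  · rintro ⟨k, hk, hm⟩
    rw [List.mem_range, hlen] at hk
    rw [pvMatchA_iff] at hm
    have hkt : k + pat.length ≤ hi.toNat - lo.toNat := by omega
    refine ⟨lo.toNat + k, by omega, by push_cast; omega, ?_⟩
    exact (pvConcOK_shift buffer pat lo.toNat (hi.toNat - lo.toNat) k (by omega) hkt).1 hm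
  · rintro ⟨p, hp1, hp2, hok⟩
    have hap : lo.toNat ≤ p := by omega
    refine ⟨p - lo.toNat, ?_, ?_⟩
    · rw [List.mem_range, hlen]; omega
    · rw [pvMatchA_iff]
      refine (pvConcOK_shift buffer pat lo.toNat (hi.toNat - lo.toNat) (p - lo.toNat)
        (by omega) (by omega)).2 ?_
      rwa [show lo.toNat + (p - lo.toNat) = p by omega]

theorem pvSorted_getD_mono (l : List Int) (h : l.Pairwise (· < ·)) (i j : Nat)
    (hij : i ≤ j) (hj : j < l.length) : l.getD i 0 ≤ l.getD j 0 := by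
  rcases eq_or_lt_of_le hij with rfl | hlt
  · exact le_refl _
  · rw [List.getD_eq_getElem l 0 (by omega), List.getD_eq_getElem l 0 hj]
    exact le_of_lt ((List.pairwise_iff_getElem.1 h) i j (by omega) hj hlt)

theorem pvFirstGeq_spec (a : List Int) (x : Int) (hs : a.Pairwise (· < ·)) :
    ∀ lo hi, lo ≤ hi → hi ≤ a.length →
      lo ≤ pvFirstGeq a x lo hi ∧ pvFirstGeq a x lo hi ≤ hi ∧
      (∀ j, lo ≤ j → j < pvFirstGeq a x lo hi → a.getD j 0 < x) ∧
      (pvFirstGeq a x lo hi < hi → x ≤ a.getD (pvFirstGeq a x lo hi) 0) := by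
  intro lo hi
  induction lo, hi using pvFirstGeq.induct a x with
  | case1 lo hi hlt hmid ih =>
    intro _ hha
    rw [pvFirstGeq, if_pos hlt, if_pos hmid]
    obtain ⟨ih1, ih2, ih3, ih4⟩ := ih (by omega) hha
    refine ⟨by omega, ih2, ?_, ih4⟩
    intro j hj hjr
    by_cases hjm : (lo + hi) / 2 + 1 ≤ j
    · exact ih3 j hjm hjr
    · calc a.getD j 0 ≤ a.getD ((lo + hi) / 2) 0 :=
            pvSorted_getD_mono a hs j _ (by omega) (by omega)
        _ < x := hmid
  | case2 lo hi hlt hmid ih =>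
    intro _ hha
    rw [pvFirstGeq, if_pos hlt, if_neg hmid]
    obtain ⟨ih1, ih2, ih3, ih4⟩ := ih (by omega) (by omega)
    refine ⟨ih1, by omega, ih3, ?_⟩
    intro hr
    by_cases hrm : pvFirstGeq a x lo ((lo + hi) / 2) < (lo + hi) / 2
    · exact ih4 hrm
    · have : pvFirstGeq a x lo ((lo + hi) / 2) = (lo + hi) / 2 := by omega
      rw [this]; omega
  | case3 lo hi hlt =>
    intro hle _
    rw [pvFirstGeq, if_neg hlt]
    exact ⟨by omega, le_refl _, by omega, by omega⟩

-- B's per-pattern bisect check, characterised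
theorem pvBcheck_iff (buffer : List Int) (pat : List (Option Int)) (lo hi : Int)
    (hhn : hi ≤ (buffer.length : Int)) :
    ((decide (pvFirstGeq (pvOccs buffer pat) lo 0 (pvOccs buffer pat).length < (pvOccs buffer pat).length) &&
      decide ((pvOccs buffer pat).getD (pvFirstGeq (pvOccs buffer pat) lo 0 (pvOccs buffer pat).length) 0 + (pat.length : Int) ≤ hi)) = true) ↔
    ∃ p : Nat, lo ≤ (p : Int) ∧ (p : Int) + pat.length ≤ hi ∧ pvConcOK buffer pat p := by
  simp only [Bool.and_eq_true, decide_eq_true_eq]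
  obtain ⟨h1, h2, h3, h4⟩ := pvFirstGeq_spec (pvOccs buffer pat) lo (pvOccs_sorted buffer pat)
    0 (pvOccs buffer pat).length (by omega) (le_refl _)
  set occ := pvOccs buffer pat with hocc
  set r := pvFirstGeq occ lo 0 occ.length with hr
  constructor
  · rintro ⟨hrl, hle⟩
    have hmem : occ.getD r 0 ∈ occ := by
      rw [List.getD_eq_getElem occ 0 hrl]; exact List.getElem_mem _
    obtain ⟨p, hpn, hok, hq⟩ := (pvOccs_mem buffer pat _).1 hmem
    exact ⟨p, by rw [← hq]; exact h4 hrl, by rw [← hq]; exact_mod_cast hle, hok⟩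
  · rintro ⟨p, hp1, hp2, hok⟩
    have hmem : (p : Int) ∈ occ := (pvOccs_mem buffer pat _).2 ⟨p, by omega, hok, rfl⟩
    obtain ⟨j, hj, hjv⟩ := List.getElem_of_mem hmem
    have hjr : r ≤ j := by
      by_contra hc
      have := h3 j (by omega) (by omega)
      rw [List.getD_eq_getElem occ 0 hj, hjv] at this
      omega
    refine ⟨by omega, ?_⟩
    have hmono := pvSorted_getD_mono occ (pvOccs_sorted buffer pat) r j hjr hj
    rw [List.getD_eq_getElem occ 0 hj, hjv] at hmono
    omega

theorem pvPat_eq (buffer : List Int) (pat : List (Option Int)) (lo hi : Int)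
    (h0 : 0 ≤ lo) (hlh : lo ≤ hi) (hhn : hi ≤ (buffer.length : Int)) :
    (find_pattern (PySem.List.slice buffer (some lo) (some hi)) pat 0 != -1) =
    (decide (pvFirstGeq (pvOccs buffer pat) lo 0 (pvOccs buffer pat).length < (pvOccs buffer pat).length) &&
     decide ((pvOccs buffer pat).getD (pvFirstGeq (pvOccs buffer pat) lo 0 (pvOccs buffer pat).length) 0 + (pat.length : Int) ≤ hi)) := by
  rw [Bool.eq_iff_iff, bne_iff_ne, pvAcheck_iff buffer pat lo hi h0 hlh hhn,
      pvBcheck_iff buffer pat lo hi hhn]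

theorem pvPat_empty (buffer : List Int) (lo hi : Int)
    (h0 : 0 ≤ lo) (hlh : lo ≤ hi) (hhn : hi ≤ (buffer.length : Int)) :
    (find_pattern (PySem.List.slice buffer (some lo) (some hi)) ([] : List (Option Int)) 0 != -1) = true := by
  rw [bne_iff_ne, pvAcheck_iff buffer [] lo hi h0 hlh hhn]
  exact ⟨lo.toNat, by omega, by simp [Int.toNat_of_nonneg h0]; omega, by intro k hk; simp at hk⟩

theorem pvSet_eq (buffer : List Int) (lo hi : Int)
    (h0 : 0 ≤ lo) (hlh : lo ≤ hi) (hhn : hi ≤ (buffer.length : Int)) :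
    ∀ pset : List (List (Option Int)),
      (pset.any (fun pat => find_pattern (PySem.List.slice buffer (some lo) (some hi)) pat 0 != -1)) =
      ((pvSetInfo buffer pset).1 ||
       (pvSetInfo buffer pset).2.any (fun mo =>
         decide (pvFirstGeq mo.2 lo 0 mo.2.length < mo.2.length) &&
         decide (mo.2.getD (pvFirstGeq mo.2 lo 0 mo.2.length) 0 + mo.1 ≤ hi))) := by
  intro pset
  induction pset with
  | nil => simp [pvSetInfo]
  | cons pat rest ih =>
    cases pat with
    | nil =>
      simp only [List.any_cons, pvSetInfo, List.isEmpty_nil, if_pos]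
      rw [pvPat_empty buffer lo hi h0 hlh hhn]
      simp
    | cons o pat' =>
      rw [show pvSetInfo buffer ((o :: pat') :: rest) =
            (((pvSetInfo buffer rest).1,
              (((o :: pat').length : Int), pvOccs buffer (o :: pat')) :: (pvSetInfo buffer rest).2)) from by
        simp [pvSetInfo]]
      simp only [List.any_cons]
      rw [ih, pvPat_eq buffer (o :: pat') lo hi h0 hlh hhn]
      cases h1 : (pvSetInfo buffer rest).1 <;> simp [Bool.or_comm]

theorem pvMain (buffer : List Int) (pattern_sets : List (List (List (Option Int)))) (max_distance : Int)
    (hpre : 0 ≤ max_distance) :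
    find_pattern_sets buffer pattern_sets max_distance = find_pattern_sets_alt buffer pattern_sets max_distance := by
  match pattern_sets with
  | [] => rfl
  | first :: rest =>
    simp only [find_pattern_sets, find_pattern_sets_alt, pvFindAll_eq_occs]
    by_cases he : (first.foldl (fun acc pat => acc ++ pvOccs buffer pat) []).isEmpty
    · rw [if_pos he, if_pos he]
    · rw [if_neg he, if_neg he]
      apply PySem.List.any_congr_mem
      intro s hs
      have hsb : 0 ≤ s ∧ s ≤ (buffer.length : Int) := by
        rw [PySem.List.foldl_append_eq_flatMap, List.nil_append] at hs
        obtain ⟨pat, _, hsm⟩ := List.mem_flatMap.1 hs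
        obtain ⟨p, hp, _, rfl⟩ := (pvOccs_mem buffer pat s).1 hsm
        constructor <;> omega
      rw [List.all_map]
      refine congrArg rest.all (funext fun pset => ?_)
      exact pvSet_eq buffer (max 0 (s - max_distance)) (min ((buffer.length : Int)) (s + max_distance))
        (by omega) (by omega) (by omega) pset

-- ===== VERDICT (by name: the statement is the Claim_ definition above) =====
theorem find_pattern_sets_spec : Claim_equal_find_pattern_sets := by
  intro buffer pattern_sets max_distance _ hpre
  exact pvMain buffer pattern_sets max_distance hpre
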